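-- pv_equiv track=rewrite | github.com/Ryan-LHR/SMiR | smir_utils/model_utils.py | get_all_misclf_number
-- ===== SOURCE A (Python) =====
-- def get_all_misclf_number(prediction_labels, true_labels, is_print=True):
--     misclf_counts = {}
--     for pred_label, true_label in zip(prediction_labels, true_labels):
--         if pred_label != true_label:
--             misclf_key = (true_label, pred_label)
--             if misclf_key in misclf_counts:
--                 misclf_counts[misclf_key] += 1
--             else:
--                 misclf_counts[misclf_key] = 1
--     misclf_counts = {k: misclf_counts[k] for k in sorted(misclf_counts)}
--     return misclf_counts
-- ===== SOURCE B (Python) =====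
-- def get_all_misclf_number(prediction_labels, true_labels, is_print=True):
--     # sort the misclassified (true, pred) pairs, then group equal runs in one scan:
--     # no per-key counting dict is ever maintained.
--     pairs = sorted((t, p) for p, t in zip(prediction_labels, true_labels) if p != t)
--     result = {}
--     i, n = 0, len(pairs)
--     while i < n:
--         j = i + 1
--         while j < n and pairs[j] == pairs[i]:
--             j += 1
--         result[pairs[i]] = j - i
--         i = j
--     return result
-- ===== Notes on version B (the rewrite author's own statement) =====
-- stated objective: alternative
-- what changed: Replaces A's hash-dict counting pass plus a separate sort of the dict keys by sort-then-group: the misclassified (true,pred) pairs are sorted as a list and equal runs are counted in one scan, emitting the result directly in sorted order with no per-key accumulator dict.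
import Mathlib
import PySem

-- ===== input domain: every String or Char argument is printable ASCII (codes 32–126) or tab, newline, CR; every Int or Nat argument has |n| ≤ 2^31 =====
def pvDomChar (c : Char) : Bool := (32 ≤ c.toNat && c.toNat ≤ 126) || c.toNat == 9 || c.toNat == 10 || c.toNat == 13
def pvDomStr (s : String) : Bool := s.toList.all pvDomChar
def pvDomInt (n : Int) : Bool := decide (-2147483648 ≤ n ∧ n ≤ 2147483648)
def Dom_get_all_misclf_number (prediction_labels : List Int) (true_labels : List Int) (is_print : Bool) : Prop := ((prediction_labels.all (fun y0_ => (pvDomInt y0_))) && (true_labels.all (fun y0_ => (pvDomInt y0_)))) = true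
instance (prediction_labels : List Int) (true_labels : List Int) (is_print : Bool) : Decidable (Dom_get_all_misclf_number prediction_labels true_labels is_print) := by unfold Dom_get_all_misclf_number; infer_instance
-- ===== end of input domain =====

-- B replaces A's hash-dict counting pass + separate key sort by sort-then-group over the
-- misclassified (true,pred) pairs (alternative decomposition, same result; is_print unused).


-- Python compares tuples lexicographically: the sort key for an (Int × Int) pair
def pvLexKey (k : Int × Int) : Lex (Int × Int) := toLex k

-- ===== PORT A =====
def get_all_misclf_number (prediction_labels : List Int) (true_labels : List Int) (_is_print : Bool) : List (Int × Int × Int) :=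
  -- for pred, true in zip: if pred != true: count key (true, pred) in a dict
  let misclf_counts : PySem.Dict (Int × Int) Int :=
    (prediction_labels.zip true_labels).foldl
      (fun d pt =>
        if pt.1 ≠ pt.2 then
          if d.contains (pt.2, pt.1) then d.modify (pt.2, pt.1) 0 (· + 1)
          else d.insert (pt.2, pt.1) 1
        else d)
      PySem.Dict.empty
  -- {k: misclf_counts[k] for k in sorted(misclf_counts)}  (tuple keys flattened to triples)
  (PySem.List.sorted misclf_counts.keys pvLexKey).map
    (fun k => (k.1, k.2, misclf_counts.getD k 0))

-- ===== PORT B =====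
-- the scanning while loop of Source B: count the run equal to the head, continue after the run
def pvGroupRuns : List (Int × Int) → List (Int × Int × Int)
  | [] => []
  | k :: rest =>
      (k.1, k.2, 1 + ((rest.takeWhile (· == k)).length : Int)) :: pvGroupRuns (rest.dropWhile (· == k))
termination_by l => l.length
decreasing_by
  have := List.length_dropWhile_le (p := (· == k)) (l := rest)
  simp only [List.length_cons]; omega

def get_all_misclf_number_alt (prediction_labels : List Int) (true_labels : List Int) (_is_print : Bool) : List (Int × Int × Int) :=
  let pairs := PySem.List.sorted
    (((prediction_labels.zip true_labels).filter (fun pt => pt.1 != pt.2)).map (fun pt => (pt.2, pt.1)))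
    pvLexKey
  pvGroupRuns pairs

-- ===== PRECONDITION & SPEC =====
def Spec_get_all_misclf_number (prediction_labels : List Int) (true_labels : List Int) (is_print : Bool) (out : List (Int × Int × Int)) : Prop := out = get_all_misclf_number_alt prediction_labels true_labels is_print
instance (prediction_labels : List Int) (true_labels : List Int) (is_print : Bool) (out : List (Int × Int × Int)) : Decidable (Spec_get_all_misclf_number prediction_labels true_labels is_print out) := by unfold Spec_get_all_misclf_number; infer_instance

-- ===== CLAIM (what is proved, stated in full; the proofs are below) =====
def Claim_equal_get_all_misclf_number : Prop := ∀ (prediction_labels : List Int) (true_labels : List Int) (is_print : Bool), Dom_get_all_misclf_number prediction_labels true_labels is_print → Spec_get_all_misclf_number prediction_labels true_labels is_print (get_all_misclf_number prediction_labels true_labels is_print)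

-- ===== LEMMAS AND PROOFS =====

-- the misclassified (true, pred) pairs, as B builds them
def pvM (prediction_labels true_labels : List Int) : List (Int × Int) :=
  ((prediction_labels.zip true_labels).filter (fun pt => pt.1 != pt.2)).map (fun pt => (pt.2, pt.1))

theorem pvLexKey_injective : Function.Injective pvLexKey := fun _ _ h => h

-- A's two dict branches are one 'modify'
theorem pv_step_eq (d : PySem.Dict (Int × Int) Int) (k : Int × Int) :
    (if d.contains k then d.modify k 0 (· + 1) else d.insert k 1) = d.modify k 0 (· + 1) := by
  by_cases h : d.contains k = true
  · simp [h]
  · simp only [Bool.not_eq_true] at h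
    simp [h, PySem.Dict.modify, PySem.Dict.getD_of_not_contains _ _ h]

-- A's counting loop is Counter(pvM), and A returns the sorted distinct keys with their counts
theorem pv_A_char (pl tl : List Int) (ip : Bool) :
    get_all_misclf_number pl tl ip =
      (PySem.List.sorted (PySem.Set.ofList (pvM pl tl)) pvLexKey).map
        (fun k => (k.1, k.2, (List.count k (pvM pl tl) : Int))) := by
  unfold get_all_misclf_number
  simp only [pv_step_eq]
  rw [PySem.List.foldl_ite_eq_foldl_filter (p := fun pt : Int × Int => pt.1 ≠ pt.2)
        (f := fun (d : PySem.Dict (Int × Int) Int) pt => d.modify (pt.2, pt.1) 0 (· + 1))]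
  have hpred : (fun x : Int × Int => decide (x.1 ≠ x.2)) = (fun pt : Int × Int => pt.1 != pt.2) := by
    funext pt; by_cases h : pt.1 = pt.2 <;> simp [h, bne]
  rw [hpred]
  have hcnt : (List.filter (fun pt : Int × Int => pt.1 != pt.2) (pl.zip tl)).foldl
      (fun (d : PySem.Dict (Int × Int) Int) pt => d.modify (pt.2, pt.1) 0 (· + 1)) PySem.Dict.empty
      = PySem.Dict.counter (pvM pl tl) := by
    unfold pvM
    rw [PySem.Dict.counter_eq_foldl, List.foldl_map]
  rw [hcnt]
  simp only [PySem.Dict.keys_counter, PySem.Dict.getD_counter]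

-- counting inside a flatMap of replicate blocks over distinct keys
theorem pv_count_flat (n : (Int × Int) → Nat) :
    ∀ (K : List (Int × Int)), K.Nodup → ∀ x,
      (K.flatMap (fun k => List.replicate (n k) k)).count x = if x ∈ K then n x else 0 := by
  intro K
  induction K with
  | nil => simp
  | cons k K ih =>
      intro hnd x
      rcases List.nodup_cons.mp hnd with ⟨hk, hnd'⟩
      simp only [List.flatMap_cons, List.count_append, ih hnd' x, List.count_replicate,
        List.mem_cons]
      by_cases hx : x = k
      · subst hx; simp [hk]
      · simp [hx, Ne.symm hx]

theorem pv_mem_flat {K : List (Int × Int)} {n : (Int × Int) → Nat} {x : Int × Int}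
    (h : x ∈ K.flatMap (fun k => List.replicate (n k) k)) : x ∈ K := by
  rcases List.mem_flatMap.mp h with ⟨k, hk, hx⟩
  rwa [List.eq_of_mem_replicate hx]

theorem pv_pairwise_flat {K : List (Int × Int)} (n : (Int × Int) → Nat)
    (h : K.Pairwise (fun a b => pvLexKey a < pvLexKey b)) :
    (K.flatMap (fun k => List.replicate (n k) k)).Pairwise (fun a b => pvLexKey a ≤ pvLexKey b) := by
  induction K with
  | nil => simp
  | cons k K ih =>
      rcases List.pairwise_cons.mp h with ⟨hk, h'⟩
      simp only [List.flatMap_cons]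
      refine List.pairwise_append.mpr ⟨List.pairwise_replicate.mpr (Or.inr le_rfl), ih h', ?_⟩
      intro a ha b hb
      rw [List.eq_of_mem_replicate ha]
      exact le_of_lt (hk _ (pv_mem_flat hb))

theorem pv_takeWhile_nil {k : Int × Int} {t : List (Int × Int)}
    (h : ∀ x ∈ t, x ≠ k) : t.takeWhile (· == k) = [] := by
  cases t with
  | nil => rfl
  | cons a t =>
      have : (a == k) = false := by simpa using h a List.mem_cons_self
      simp [this]

theorem pv_dropWhile_id {k : Int × Int} {t : List (Int × Int)}
    (h : ∀ x ∈ t, x ≠ k) : t.dropWhile (· == k) = t := by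
  cases t with
  | nil => rfl
  | cons a t =>
      have : (a == k) = false := by simpa using h a List.mem_cons_self
      simp [this]

theorem pv_tw_replicate (m : Nat) (k : Int × Int) :
    (List.replicate m k).takeWhile (· == k) = List.replicate m k := by
  induction m with
  | zero => rfl
  | succ m ih => simp [List.replicate_succ, ih]

theorem pv_dw_replicate (m : Nat) (k : Int × Int) :
    (List.replicate m k).dropWhile (· == k) = [] := by
  induction m with
  | zero => rfl
  | succ m ih => simp [List.replicate_succ, ih]

-- grouping the concatenation of replicate blocks yields one triple per key
theorem pv_group_flat (n : (Int × Int) → Nat) :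
    ∀ (K : List (Int × Int)), K.Pairwise (fun a b => pvLexKey a < pvLexKey b) →
      (∀ k ∈ K, 1 ≤ n k) →
      pvGroupRuns (K.flatMap (fun k => List.replicate (n k) k)) =
        K.map (fun k => (k.1, k.2, (n k : Int))) := by
  intro K
  induction K with
  | nil => intro _ _; simp only [List.flatMap_nil, List.map_nil]; rw [pvGroupRuns.eq_1]
  | cons k K ih =>
      intro hp hpos
      rcases List.pairwise_cons.mp hp with ⟨hk, hp'⟩
      obtain ⟨m, hm⟩ : ∃ m, n k = m + 1 :=
        ⟨n k - 1, by have := hpos k List.mem_cons_self; omega⟩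
      have hne : ∀ x ∈ K.flatMap (fun k => List.replicate (n k) k), x ≠ k := by
        intro x hx he
        have := hk x (pv_mem_flat hx)
        rw [he] at this
        exact lt_irrefl _ this
      simp only [List.flatMap_cons, List.map_cons, hm, List.replicate_succ, List.cons_append]
      rw [pvGroupRuns.eq_2]
      have htw : (List.replicate m k ++ K.flatMap (fun k => List.replicate (n k) k)).takeWhile (· == k)
          = List.replicate m k := by
        rw [List.takeWhile_append, pv_tw_replicate]
        simp [pv_takeWhile_nil hne]
      have hdw : (List.replicate m k ++ K.flatMap (fun k => List.replicate (n k) k)).dropWhile (· == k)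
          = K.flatMap (fun k => List.replicate (n k) k) := by
        rw [List.dropWhile_append, pv_dw_replicate]
        simp [pv_dropWhile_id hne]
      rw [htw, hdw, ih hp' (fun x hx => hpos x (List.mem_cons_of_mem _ hx))]
      simp
      ring

-- ===== VERDICT (by name: the statement is the Claim_ definition above) =====
theorem get_all_misclf_number_spec : Claim_equal_get_all_misclf_number := by
  intro pl tl ip _hdom
  unfold Spec_get_all_misclf_number get_all_misclf_number_alt
  rw [pv_A_char]
  have hMeq : (((pl.zip tl).filter (fun pt => pt.1 != pt.2)).map (fun pt => (pt.2, pt.1))) = pvM pl tl := rfl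
  rw [hMeq]
  set M := pvM pl tl with hM
  set K := PySem.List.sorted (PySem.Set.ofList M) pvLexKey with hK
  have hKnd : K.Nodup := ((PySem.List.sorted_perm _ _ _).symm).nodup (PySem.Set.nodup_ofList M)
  have hKle : K.Pairwise (fun a b => pvLexKey a ≤ pvLexKey b) := PySem.List.sorted_pairwise _ _
  have hKlt : K.Pairwise (fun a b => pvLexKey a < pvLexKey b) := by
    refine (hKle.and hKnd).imp ?_
    rintro a b ⟨hle, hne⟩
    exact lt_of_le_of_ne hle (fun h => hne (pvLexKey_injective h))
  have hmemK : ∀ x : Int × Int, x ∈ K ↔ x ∈ M := by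
    intro x
    rw [hK, PySem.List.mem_sorted, PySem.Set.mem_ofList]
  set F := K.flatMap (fun k => List.replicate (List.count k M) k) with hF
  have hperm : (PySem.List.sorted M pvLexKey).Perm F := by
    refine (PySem.List.sorted_perm _ _ _).trans (List.perm_iff_count.mpr ?_)
    intro a
    rw [hF, pv_count_flat _ K hKnd a]
    by_cases ha : a ∈ M
    · simp [(hmemK a).mpr ha]
    · simp [List.count_eq_zero.mpr ha]
  have hS : PySem.List.sorted M pvLexKey = F :=
    PySem.List.eq_of_perm_of_pairwise_le_of_injective pvLexKey pvLexKey_injective hperm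
      (PySem.List.sorted_pairwise _ _) (pv_pairwise_flat _ hKlt)
  rw [hS, hF, pv_group_flat _ K hKlt]
  intro x hx
  exact List.count_pos_iff.mpr ((hmemK x).mp hx)
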